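-- pv_equiv track=rewrite | github.com/ericc59/aria | aria/guided/dsl.py | _ray_cells
-- ===== SOURCE A (Python) =====
-- def _ray_cells(row, col, dr, dc, max_steps, shape):
--     """Cell sequence for a ray from (row,col) in direction (dr,dc)."""
--     cells = []
--     r, c = row + dr, col + dc
--     for _ in range(max_steps):
--         if r < 0 or r >= shape[0] or c < 0 or c >= shape[1]:
--             break
--         cells.append((r, c))
--         r += dr
--         c += dc
--     return cells
-- ===== SOURCE B (Python) =====
-- def _ray_count(row, col, dr, dc, max_steps, shape):
--     """Number of in-bounds ray cells, computed arithmetically (no scanning).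
--     Assumes the first cell (row+dr, col+dc) is in bounds."""
--     count = max_steps
--     if dr > 0:
--         count = min(count, (shape[0] - 1 - row) // dr)
--     elif dr < 0:
--         count = min(count, row // (-dr))
--     if dc > 0:
--         count = min(count, (shape[1] - 1 - col) // dc)
--     elif dc < 0:
--         count = min(count, col // (-dc))
--     return count
--
--
-- def _ray_cells(row, col, dr, dc, max_steps, shape):
--     """Cell sequence for a ray from (row,col) in direction (dr,dc)."""
--     r0, c0 = row + dr, col + dc
--     if max_steps <= 0 or r0 < 0 or r0 >= shape[0] or c0 < 0 or c0 >= shape[1]: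
--         return []
--     count = _ray_count(row, col, dr, dc, max_steps, shape)
--     return [(row + i * dr, col + i * dc) for i in range(1, count + 1)]
-- ===== Notes on version B (the rewrite author's own statement) =====
-- stated objective: alternative
-- what changed: B replaces A's cell-by-cell scan with break by an arithmetic computation of the number of in-bounds steps (floor-division limits per axis, min with max_steps) followed by a single list comprehension.
import Mathlib
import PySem

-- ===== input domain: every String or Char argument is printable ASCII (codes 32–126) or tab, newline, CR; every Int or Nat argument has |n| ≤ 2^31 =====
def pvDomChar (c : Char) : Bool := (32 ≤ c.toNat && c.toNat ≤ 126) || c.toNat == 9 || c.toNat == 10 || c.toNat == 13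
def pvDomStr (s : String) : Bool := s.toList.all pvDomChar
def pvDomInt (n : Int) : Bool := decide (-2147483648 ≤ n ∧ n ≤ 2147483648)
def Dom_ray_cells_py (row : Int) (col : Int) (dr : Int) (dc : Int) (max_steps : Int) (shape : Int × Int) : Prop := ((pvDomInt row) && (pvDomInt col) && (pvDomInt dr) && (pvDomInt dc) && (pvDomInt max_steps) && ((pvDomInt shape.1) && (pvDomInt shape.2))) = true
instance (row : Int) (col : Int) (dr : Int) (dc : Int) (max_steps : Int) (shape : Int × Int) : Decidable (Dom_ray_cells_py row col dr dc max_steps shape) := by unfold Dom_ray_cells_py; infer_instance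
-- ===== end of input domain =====

-- B replaces A's step-by-step scan with an arithmetic count of in-bounds steps plus one
-- comprehension (alternative decomposition; same asymptotic cost, both are linear in the output).

-- ===== PORT A =====
-- the for-loop of A: fuel = remaining iterations of `range(max_steps)`, state (r, c, cells)
def rayLoopA (dr : Int) (dc : Int) (s0 : Int) (s1 : Int) : Nat → Int → Int → List (Int × Int) → List (Int × Int)
  | 0, _, _, cells => cells
  | n + 1, r, c, cells =>
    if r < 0 ∨ s0 ≤ r ∨ c < 0 ∨ s1 ≤ c then cells
    else rayLoopA dr dc s0 s1 n (r + dr) (c + dc) (cells ++ [(r, c)])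

def ray_cells_py (row : Int) (col : Int) (dr : Int) (dc : Int) (max_steps : Int) (shape : Int × Int) : List (Int × Int) :=
  rayLoopA dr dc shape.1 shape.2 max_steps.toNat (row + dr) (col + dc) []

-- ===== PORT B =====
-- Source B's helper _ray_count: the number of in-bounds ray cells, computed arithmetically
def ray_count (row : Int) (col : Int) (dr : Int) (dc : Int) (max_steps : Int) (s0 : Int) (s1 : Int) : Int :=
  let count := max_steps
  let count := if dr > 0 then min count (PySem.Int.floordiv (s0 - 1 - row) dr)
               else if dr < 0 then min count (PySem.Int.floordiv row (-dr))
               else count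
  let count := if dc > 0 then min count (PySem.Int.floordiv (s1 - 1 - col) dc)
               else if dc < 0 then min count (PySem.Int.floordiv col (-dc))
               else count
  count

def ray_cells_py_alt (row : Int) (col : Int) (dr : Int) (dc : Int) (max_steps : Int) (shape : Int × Int) : List (Int × Int) :=
  let r0 := row + dr
  let c0 := col + dc
  if max_steps ≤ 0 ∨ r0 < 0 ∨ shape.1 ≤ r0 ∨ c0 < 0 ∨ shape.2 ≤ c0 then []
  else (PySem.List.pyRange 1 (ray_count row col dr dc max_steps shape.1 shape.2 + 1) 1).map
         (fun i => (row + i * dr, col + i * dc))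

-- ===== PRECONDITION & SPEC =====
def Spec_ray_cells_py (row : Int) (col : Int) (dr : Int) (dc : Int) (max_steps : Int) (shape : Int × Int) (out : List (Int × Int)) : Prop := out = ray_cells_py_alt row col dr dc max_steps shape
instance (row : Int) (col : Int) (dr : Int) (dc : Int) (max_steps : Int) (shape : Int × Int) (out : List (Int × Int)) : Decidable (Spec_ray_cells_py row col dr dc max_steps shape out) := by unfold Spec_ray_cells_py; infer_instance

-- ===== CLAIM (what is proved, stated in full; the proofs are below) =====
def Claim_equal_ray_cells_py : Prop := ∀ (row : Int) (col : Int) (dr : Int) (dc : Int) (max_steps : Int) (shape : Int × Int), Dom_ray_cells_py row col dr dc max_steps shape → Spec_ray_cells_py row col dr dc max_steps shape (ray_cells_py row col dr dc max_steps shape)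

-- ===== LEMMAS AND PROOFS =====

-- floor division shifts by one when the dividend drops by the (positive) divisor
lemma pv_fdiv_shift (a b : Int) (hb : 0 < b) :
    PySem.Int.floordiv (a - b) b = PySem.Int.floordiv a b - 1 := by
  have h := (PySem.Int.floordiv_eq_iff_of_pos hb (q := PySem.Int.floordiv a b)).mp rfl
  refine (PySem.Int.floordiv_eq_iff_of_pos hb).mpr ⟨?_, ?_⟩ <;> nlinarith [h.1, h.2]

lemma pv_count_le_ms (row col dr dc ms s0 s1 : Int) :
    ray_count row col dr dc ms s0 s1 ≤ ms := by
  unfold ray_count; dsimp only; split_ifs <;> omega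

lemma pv_count_ge_one (row col dr dc ms s0 s1 : Int) (hms : 1 ≤ ms)
    (h1 : 0 ≤ row + dr) (h2 : row + dr < s0) (h3 : 0 ≤ col + dc) (h4 : col + dc < s1) :
    1 ≤ ray_count row col dr dc ms s0 s1 := by
  have A1 : 0 < dr → 1 ≤ PySem.Int.floordiv (s0 - 1 - row) dr := fun h => by
    rw [PySem.Int.le_floordiv_iff_mul_le h]; nlinarith
  have A2 : dr < 0 → 1 ≤ PySem.Int.floordiv row (-dr) := fun h => by
    rw [PySem.Int.le_floordiv_iff_mul_le (by omega)]; nlinarith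
  have B1 : 0 < dc → 1 ≤ PySem.Int.floordiv (s1 - 1 - col) dc := fun h => by
    rw [PySem.Int.le_floordiv_iff_mul_le h]; nlinarith
  have B2 : dc < 0 → 1 ≤ PySem.Int.floordiv col (-dc) := fun h => by
    rw [PySem.Int.le_floordiv_iff_mul_le (by omega)]; nlinarith
  unfold ray_count; dsimp only
  split_ifs
  all_goals try have := A1 (by assumption)
  all_goals try have := A2 (by assumption)
  all_goals try have := B1 (by assumption)
  all_goals try have := B2 (by assumption)
  all_goals omega

lemma pv_count_shift (row col dr dc ms s0 s1 : Int) :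
    ray_count (row + dr) (col + dc) dr dc (ms - 1) s0 s1 = ray_count row col dr dc ms s0 s1 - 1 := by
  unfold ray_count; dsimp only
  have hr1 : ∀ _ : 0 < dr, PySem.Int.floordiv (s0 - 1 - (row + dr)) dr
      = PySem.Int.floordiv (s0 - 1 - row) dr - 1 := fun h => by
    have := pv_fdiv_shift (s0 - 1 - row) dr h
    rw [← this]; ring_nf
  have hr2 : ∀ _ : dr < 0, PySem.Int.floordiv (row + dr) (-dr)
      = PySem.Int.floordiv row (-dr) - 1 := fun h => by
    have := pv_fdiv_shift row (-dr) (by omega)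
    rw [← this]; ring_nf
  have hc1 : ∀ _ : 0 < dc, PySem.Int.floordiv (s1 - 1 - (col + dc)) dc
      = PySem.Int.floordiv (s1 - 1 - col) dc - 1 := fun h => by
    have := pv_fdiv_shift (s1 - 1 - col) dc h
    rw [← this]; ring_nf
  have hc2 : ∀ _ : dc < 0, PySem.Int.floordiv (col + dc) (-dc)
      = PySem.Int.floordiv col (-dc) - 1 := fun h => by
    have := pv_fdiv_shift col (-dc) (by omega)
    rw [← this]; ring_nf
  split_ifs with h1 h2 h3 h4 h3 h4 <;> simp only [*] <;> omega

-- if the SECOND ray cell is out of bounds (first in bounds), the count is at most one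
lemma pv_count_le_one (row col dr dc ms s0 s1 : Int)
    (h1 : 0 ≤ row + dr) (h2 : row + dr < s0) (h3 : 0 ≤ col + dc) (h4 : col + dc < s1)
    (hoob : row + dr + dr < 0 ∨ s0 ≤ row + dr + dr ∨ col + dc + dc < 0 ∨ s1 ≤ col + dc + dc) :
    ray_count row col dr dc ms s0 s1 ≤ 1 := by
  unfold ray_count; dsimp only
  rcases hoob with h | h | h | h
  · have hdr : dr < 0 := by omega
    have : PySem.Int.floordiv row (-dr) < 2 := by
      rw [PySem.Int.floordiv_lt_iff_lt_mul (by omega)]; omega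
    split_ifs <;> omega
  · have hdr : 0 < dr := by omega
    have : PySem.Int.floordiv (s0 - 1 - row) dr < 2 := by
      rw [PySem.Int.floordiv_lt_iff_lt_mul (by omega)]; omega
    split_ifs <;> omega
  · have hdc : dc < 0 := by omega
    have : PySem.Int.floordiv col (-dc) < 2 := by
      rw [PySem.Int.floordiv_lt_iff_lt_mul (by omega)]; omega
    split_ifs <;> omega
  · have hdc : 0 < dc := by omega
    have : PySem.Int.floordiv (s1 - 1 - col) dc < 2 := by
      rw [PySem.Int.floordiv_lt_iff_lt_mul (by omega)]; omega
    split_ifs <;> omega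

-- the accumulator of A's loop is a prefix of its result
lemma pv_loop_acc (dr dc s0 s1 : Int) (n : Nat) :
    ∀ (r c : Int) (cells : List (Int × Int)),
      rayLoopA dr dc s0 s1 n r c cells = cells ++ rayLoopA dr dc s0 s1 n r c [] := by
  induction n with
  | zero => intro r c cells; simp [rayLoopA]
  | succ n ih =>
    intro r c cells
    simp only [rayLoopA]
    split_ifs with h
    · simp
    · rw [ih (r + dr) (c + dc) (cells ++ [(r, c)]), ih (r + dr) (c + dc) ([] ++ [(r, c)])]
      simp

-- B's comprehension over a positive count splits off its first cell
lemma pv_map_cons (row col dr dc m : Int) (hm : 1 ≤ m) :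
    (PySem.List.pyRange 1 (m + 1) 1).map (fun i => (row + i * dr, col + i * dc)) =
      (row + dr, col + dc) ::
        (PySem.List.pyRange 1 ((m - 1) + 1) 1).map
          (fun i => ((row + dr) + i * dr, ((col + dc) + i * dc))) := by
  rw [PySem.List.pyRange_one, PySem.List.pyRange_one]
  have h1 : (m + 1 - 1).toNat = (m - 1).toNat + 1 := by omega
  have h2 : (m - 1 + 1 - 1).toNat = (m - 1).toNat := by omega
  rw [h1, h2, List.range_succ_eq_map]
  simp only [List.map_cons, List.map_map]
  congr 1
  · simp only [Prod.mk.injEq]; constructor <;> push_cast <;> ring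
  · apply List.map_congr_left
    intro k _
    simp only [Function.comp_apply, Nat.succ_eq_add_one, Prod.mk.injEq]
    constructor <;> push_cast <;> ring

-- the heart of the proof: A's loop from the first ray cell equals B's guarded comprehension
lemma pv_core (dr dc s0 s1 : Int) (n : Nat) :
    ∀ (row col : Int),
      rayLoopA dr dc s0 s1 n (row + dr) (col + dc) [] =
        if n = 0 ∨ row + dr < 0 ∨ s0 ≤ row + dr ∨ col + dc < 0 ∨ s1 ≤ col + dc then []
        else (PySem.List.pyRange 1 (ray_count row col dr dc (n : Int) s0 s1 + 1) 1).map
               (fun i => (row + i * dr, col + i * dc)) := by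
  induction n with
  | zero => intro row col; simp [rayLoopA]
  | succ n ih =>
    intro row col
    simp only [rayLoopA]
    by_cases hoob : row + dr < 0 ∨ s0 ≤ row + dr ∨ col + dc < 0 ∨ s1 ≤ col + dc
    · rw [if_pos hoob, if_pos (Or.inr hoob)]
    · have h1 : 0 ≤ row + dr := by omega
      have h2 : row + dr < s0 := by omega
      have h3 : 0 ≤ col + dc := by omega
      have h4 : col + dc < s1 := by omega
      rw [if_neg (by omega), if_neg (by omega)]
      rw [pv_loop_acc]
      have hshift : ray_count (row + dr) (col + dc) dr dc (n : Int) s0 s1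
          = ray_count row col dr dc ((n : Int) + 1) s0 s1 - 1 := by
        have := pv_count_shift row col dr dc ((n : Int) + 1) s0 s1
        simpa using this
      have hge1 : 1 ≤ ray_count row col dr dc ((n : Int) + 1) s0 s1 :=
        pv_count_ge_one row col dr dc _ s0 s1 (by omega) h1 h2 h3 h4
      have hcast : ((n + 1 : Nat) : Int) = (n : Int) + 1 := by push_cast; ring
      rw [hcast, pv_map_cons row col dr dc _ hge1, ih (row + dr) (col + dc)]
      by_cases hn0 : n = 0
      · subst hn0
        have hm1 : ray_count row col dr dc (1 : Int) s0 s1 = 1 := by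
          have ha := pv_count_le_ms row col dr dc 1 s0 s1
          have hb := hge1
          norm_num at hb
          omega
        norm_num [hm1, PySem.List.pyRange_one]
      · by_cases hoob2 : row + dr + dr < 0 ∨ s0 ≤ row + dr + dr ∨ col + dc + dc < 0 ∨ s1 ≤ col + dc + dc
        · rw [if_pos (Or.inr hoob2), List.append_nil]
          have hle : ray_count row col dr dc ((n : Int) + 1) s0 s1 ≤ 1 :=
            pv_count_le_one row col dr dc _ s0 s1 h1 h2 h3 h4 hoob2
          have hm1 : ray_count row col dr dc ((n : Int) + 1) s0 s1 = 1 := le_antisymm hle hge1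
          norm_num [hm1, PySem.List.pyRange_one]
        · rw [if_neg (by omega), hshift]
          simp

-- ===== VERDICT (by name: the statement is the Claim_ definition above) =====
theorem ray_cells_py_spec : Claim_equal_ray_cells_py := by
  intro row col dr dc max_steps shape _
  unfold Spec_ray_cells_py ray_cells_py ray_cells_py_alt
  dsimp only
  by_cases hms : max_steps ≤ 0
  · have : max_steps.toNat = 0 := by omega
    rw [this, if_pos (Or.inl hms)]
    simp [rayLoopA]
  · have hms' : (max_steps.toNat : Int) = max_steps := by omega
    rw [pv_core dr dc shape.1 shape.2 max_steps.toNat row col, hms']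
    have hne : max_steps.toNat ≠ 0 := by omega
    by_cases hoob : row + dr < 0 ∨ shape.1 ≤ row + dr ∨ col + dc < 0 ∨ shape.2 ≤ col + dc
    · rw [if_pos (Or.inr hoob), if_pos (Or.inr hoob)]
    · rw [if_neg (by tauto), if_neg (by tauto)]
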